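-- pv_equiv track=rewrite | github.com/Pixel2022UA/PortaOne | main.py | check_match_with_position
-- ===== SOURCE A (Python) =====
-- from collections import Counter, defaultdict
--
-- def check_match_with_position(window, fg_letters_str, fg_letters_set, fg_counter):
--     known = window.replace("*", "")
--     if not known:
--         return 0
--
--     win_set = set(known)
--     win_counter = Counter(known)
--
--     if not win_set.issubset(fg_letters_set):
--         return -1
--     for letter, count in win_counter.items():
--         if count > fg_counter.get(letter, 0):
--             return -1
--
--     base_score = sum(win_counter.values())
--     position_bonus = 0
--
--     for idx, ch in enumerate(window):
--         if ch == "*":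
--             continue
--         if idx < len(fg_letters_str) and fg_letters_str[idx] == ch:
--             position_bonus += 1
--
--     return base_score + 2 * position_bonus
-- ===== SOURCE B (Python) =====
-- def check_match_with_position(window, fg_letters_str, fg_letters_set, fg_counter):
--     counts = {}
--     score = 0
--     n = len(fg_letters_str)
--     for idx, ch in enumerate(window):
--         if ch == "*":
--             continue
--         if ch not in fg_letters_set:
--             return -1
--         c = counts.get(ch, 0) + 1
--         if c > fg_counter.get(ch, 0):
--             return -1
--         counts[ch] = c
--         score += 1
--         if idx < n and fg_letters_str[idx] == ch:
--             score += 2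
--     return score
-- ===== Notes on version B (the rewrite author's own statement) =====
-- stated objective: simpler
-- what changed: Replaces A's replace+set+Counter preprocessing and three separate passes (subset check, count check, position-bonus loop) with a single fused enumerate pass keeping a running count dict and score, returning -1 at the first missing letter or count overflow.
import Mathlib
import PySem

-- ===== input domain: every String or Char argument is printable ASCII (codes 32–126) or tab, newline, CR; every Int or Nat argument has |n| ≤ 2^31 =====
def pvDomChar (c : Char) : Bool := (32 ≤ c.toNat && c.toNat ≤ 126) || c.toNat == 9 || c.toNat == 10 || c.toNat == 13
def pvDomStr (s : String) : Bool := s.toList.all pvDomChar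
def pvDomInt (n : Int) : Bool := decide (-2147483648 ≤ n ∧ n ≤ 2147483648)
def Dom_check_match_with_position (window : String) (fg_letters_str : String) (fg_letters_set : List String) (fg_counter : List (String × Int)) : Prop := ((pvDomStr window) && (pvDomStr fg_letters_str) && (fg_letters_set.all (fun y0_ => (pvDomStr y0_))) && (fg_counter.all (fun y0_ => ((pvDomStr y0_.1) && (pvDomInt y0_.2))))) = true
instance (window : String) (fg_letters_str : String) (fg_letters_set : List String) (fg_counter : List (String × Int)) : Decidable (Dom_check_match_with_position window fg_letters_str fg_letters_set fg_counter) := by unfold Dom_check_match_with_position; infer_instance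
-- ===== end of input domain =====

-- B is a single fused pass over the enumerated window (simpler decomposition); A's three separate passes are kept literally in its port.

-- ===== PORT A =====
-- the 'for letter, count in win_counter.items(): if count > fg_counter.get(letter, 0): return -1' loop
def pvOverflowLoop (fcnt : PySem.Dict String Int) : List (String × Int) → Bool
  | [] => false
  | (letter, count) :: rest => if fcnt.getD letter 0 < count then true else pvOverflowLoop fcnt rest

def check_match_with_position (window : String) (fg_letters_str : String) (fg_letters_set : List String) (fg_counter : List (String × Int)) : Int :=
  let known := PySem.Str.replace window "*" ""
  if known.toList.isEmpty then 0
  else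
    -- Python's set(known)/Counter(known) hold 1-character strings
    let winSet : PySem.Set String := PySem.Set.ofList (known.toList.map (fun c => String.ofList [c]))
    let winCounter : PySem.Dict String Int := PySem.Dict.counter (known.toList.map (fun c => String.ofList [c]))
    if !(PySem.Set.issubset winSet fg_letters_set) then -1
    else if pvOverflowLoop (PySem.Dict.mk fg_counter) winCounter.items then -1
    else
      let baseScore := winCounter.values.sum
      let positionBonus := (PySem.List.enumerate window.toList 0).foldl
        (fun b p => if p.2 == '*' then b
          else if (decide (p.1 < PySem.Str.len fg_letters_str) && (PySem.Str.pyGet? fg_letters_str p.1 == some p.2)) then b + 1 else b) 0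
      baseScore + 2 * positionBonus

-- ===== PORT B =====
-- single pass with early return: running counts dict + accumulated score
def pvAltGo (fgs : String) (fset : List String) (fcnt : PySem.Dict String Int) : List (Int × Char) → PySem.Dict String Int → Int → Int
  | [], _, score => score
  | (i, c) :: rest, counts, score =>
    if c == '*' then pvAltGo fgs fset fcnt rest counts score
    else
      let s := String.ofList [c]
      if !(fset.contains s) then -1
      else
        let k := counts.getD s 0 + 1
        if fcnt.getD s 0 < k then -1
        else pvAltGo fgs fset fcnt rest (counts.insert s k)
          (score + 1 + (if (decide (i < PySem.Str.len fgs) && (PySem.Str.pyGet? fgs i == some c)) then 2 else 0))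

def check_match_with_position_alt (window : String) (fg_letters_str : String) (fg_letters_set : List String) (fg_counter : List (String × Int)) : Int :=
  pvAltGo fg_letters_str fg_letters_set (PySem.Dict.mk fg_counter) (PySem.List.enumerate window.toList 0) PySem.Dict.empty 0

-- ===== PRECONDITION & SPEC =====
def Spec_check_match_with_position (window : String) (fg_letters_str : String) (fg_letters_set : List String) (fg_counter : List (String × Int)) (out : Int) : Prop := out = check_match_with_position_alt window fg_letters_str fg_letters_set fg_counter
instance (window : String) (fg_letters_str : String) (fg_letters_set : List String) (fg_counter : List (String × Int)) (out : Int) : Decidable (Spec_check_match_with_position window fg_letters_str fg_letters_set fg_counter out) := by unfold Spec_check_match_with_position; infer_instance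

-- ===== CLAIM (what is proved, stated in full; the proofs are below) =====
def Claim_equal_check_match_with_position : Prop := ∀ (window : String) (fg_letters_str : String) (fg_letters_set : List String) (fg_counter : List (String × Int)), Dom_check_match_with_position window fg_letters_str fg_letters_set fg_counter → Spec_check_match_with_position window fg_letters_str fg_letters_set fg_counter (check_match_with_position window fg_letters_str fg_letters_set fg_counter)

-- ===== LEMMAS AND PROOFS =====

-- the position-match test, named for the proofs
def pvPM (fgs : String) (p : Int × Char) : Bool :=
  decide (p.1 < PySem.Str.len fgs) && (PySem.Str.pyGet? fgs p.1 == some p.2)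


theorem pv_replace_go (fuel : Nat) (l acc : List Char) (h : l.length ≤ fuel) :
    PySem.Chars.replace.go ['*'] [] fuel l acc = acc.reverse ++ l.filter (fun c => !(c == '*')) := by
  induction fuel generalizing l acc with
  | zero =>
    have : l = [] := by cases l <;> simp_all
    subst this; simp [PySem.Chars.replace.go]
  | succ n ih =>
    cases l with
    | nil => simp [PySem.Chars.replace.go]
    | cons c t =>
      rw [PySem.Chars.replace.go]
      simp only [List.isPrefixOf, List.filter]
      by_cases hc : c = '*'
      · simp [hc, ih t acc (by simpa using h)]
      · have hb : (c == '*') = false := by simp [hc]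
        simp [hb, ih t (c :: acc) (by simpa using h)]
        exact fun h' => absurd h'.symm hc

theorem pv_replace_star (w : String) :
    (PySem.Str.replace w "*" "").toList = w.toList.filter (fun c => !(c == '*')) := by
  rw [PySem.Str.toList_replace]
  show PySem.Chars.replace w.toList ['*'] [] = _
  rw [PySem.Chars.replace]
  rw [if_neg (by simp)]
  rw [pv_replace_go _ _ _ le_rfl]
  simp


theorem pv_bonus_countP (fgs : String) (l : List (Int × Char)) (acc : Int) :
    l.foldl (fun b p => if p.2 == '*' then b
        else if (decide (p.1 < PySem.Str.len fgs) && (PySem.Str.pyGet? fgs p.1 == some p.2)) then b + 1 else b) acc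
      = acc + (l.countP (fun p => !(p.2 == '*') && pvPM fgs p) : Int) := by
  induction l generalizing acc with
  | nil => simp
  | cons p rest ih =>
    simp only [List.foldl_cons, List.countP_cons, ih, pvPM]
    by_cases h1 : p.2 = '*' <;> by_cases h2 : (decide (p.1 < PySem.Str.len fgs) && (PySem.Str.pyGet? fgs p.1 == some p.2)) = true <;>
      simp [h1, h2] <;> split_ifs <;> omega

theorem pv_sum_counts (l : List String) :
    (((PySem.Set.ofList l).map (fun k => (l.count k : Int))).sum) = (l.length : Int) := by
  have hperm : (PySem.Set.ofList l).Perm l.dedup := by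
    rw [List.perm_ext_iff_of_nodup (PySem.Set.nodup_ofList l) l.nodup_dedup]
    intro a; simp [PySem.Set.mem_ofList, List.mem_dedup]
  have := (hperm.map (fun k => (l.count k : Int))).sum_eq
  rw [this]
  have h2 : (l.dedup.map fun x => l.count x).sum = l.length := List.sum_map_count_dedup_eq_length l
  calc (l.dedup.map fun k => (l.count k : Int)).sum
      = ((l.dedup.map fun x => l.count x).sum : Int) := by
        rw [Nat.cast_list_sum, List.map_map]; rfl
    _ = (l.length : Int) := by rw [h2]


theorem pv_altGo_spec (fgs : String) (fset : List String) (fcnt : PySem.Dict String Int)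
    (es : List (Int × Char)) : ∀ (counts : PySem.Dict String Int) (score : Int) (q : List String),
    (∀ s, counts.getD s 0 = (q.count s : Int)) →
    (∀ s ∈ q, (q.count s : Int) ≤ fcnt.getD s 0) →
    pvAltGo fgs fset fcnt es counts score =
      (if (∀ s ∈ ((es.map (·.2)).filter (fun c => !(c == '*'))).map (fun c => String.ofList [c]), s ∈ fset)
          ∧ (∀ s ∈ ((es.map (·.2)).filter (fun c => !(c == '*'))).map (fun c => String.ofList [c]),
              (q.count s : Int) + ((((es.map (·.2)).filter (fun c => !(c == '*'))).map (fun c => String.ofList [c])).count s : Int) ≤ fcnt.getD s 0)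
       then score + ((((es.map (·.2)).filter (fun c => !(c == '*'))).length : Int))
              + 2 * (es.countP (fun p => !(p.2 == '*') && pvPM fgs p) : Int)
       else -1) := by
  induction es with
  | nil => intro counts score q hq hok; simp [pvAltGo]
  | cons p rest ih =>
    obtain ⟨i, c⟩ := p
    intro counts score q hq hok
    by_cases hc : c = '*'
    · subst hc
      have hstep : pvAltGo fgs fset fcnt ((i, '*') :: rest) counts score
          = pvAltGo fgs fset fcnt rest counts score := by simp [pvAltGo]
      rw [hstep, ih counts score q hq hok]
      have hf : List.filter (fun c => !(c == '*')) ('*' :: rest.map (·.2)) = List.filter (fun c => !(c == '*')) (rest.map (·.2)) := by simp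
      have hcp : List.countP (fun p => !(p.2 == '*') && (decide (p.1 < PySem.Str.len fgs) && (PySem.Str.pyGet? fgs p.1 == some p.2))) ((i, '*') :: rest)
          = List.countP (fun p => !(p.2 == '*') && (decide (p.1 < PySem.Str.len fgs) && (PySem.Str.pyGet? fgs p.1 == some p.2))) rest := by
        simp [List.countP_cons]
      simp only [List.map_cons, hf, hcp, pvPM]
    · have hcb : (c == '*') = false := by simp [hc]
      by_cases hmem : String.ofList [c] ∈ fset
      · by_cases hover : fcnt.getD (String.ofList [c]) 0 < counts.getD (String.ofList [c]) 0 + 1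
        · -- overflow: both sides -1
          have hstep : pvAltGo fgs fset fcnt ((i, c) :: rest) counts score = -1 := by
            simp [pvAltGo, hcb, hmem, hover]
          rw [hstep, if_neg]
          rintro ⟨-, h2⟩
          have hmemK : String.ofList [c] ∈ (((((i, c) :: rest).map (·.2)).filter (fun c => !(c == '*'))).map (fun c => String.ofList [c])) := by
            simp [hcb]
          have h3 := h2 _ hmemK
          have h4 : (1 : Int) ≤ (((((i, c) :: rest).map (·.2)).filter (fun c => !(c == '*'))).map (fun c => String.ofList [c])).count (String.ofList [c]) := by
            have := List.count_pos_iff.mpr hmemK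
            omega
          rw [hq] at hover
          omega
        · -- proceed
          have hstep : pvAltGo fgs fset fcnt ((i, c) :: rest) counts score
              = pvAltGo fgs fset fcnt rest (counts.insert (String.ofList [c]) (counts.getD (String.ofList [c]) 0 + 1))
                  (score + 1 + (if (decide (i < PySem.Str.len fgs) && (PySem.Str.pyGet? fgs i == some c)) then 2 else 0)) := by
            simp [pvAltGo, hcb, hmem, hover]
          have hq' : ∀ t, (counts.insert (String.ofList [c]) (counts.getD (String.ofList [c]) 0 + 1)).getD t 0
              = ((q ++ [String.ofList [c]]).count t : Int) := by
            intro t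
            by_cases ht : t = String.ofList [c]
            · subst ht
              simp [PySem.Dict.getD_insert, List.count_append, hq]
            · rw [PySem.Dict.getD_insert, if_neg ht]
              have : (String.ofList [c] == t) = false := beq_eq_false_iff_ne.mpr (Ne.symm ht)
              simp [List.count_append, hq, List.count_cons, this]
          have hcap : counts.getD (String.ofList [c]) 0 + 1 ≤ fcnt.getD (String.ofList [c]) 0 := by omega
          rw [hq] at hcap
          have hok' : ∀ t ∈ q ++ [String.ofList [c]], (((q ++ [String.ofList [c]]).count t : Int)) ≤ fcnt.getD t 0 := by
            intro t ht
            by_cases hts : t = String.ofList [c]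
            · subst hts
              simp only [List.count_append, List.count_singleton]
              push_cast
              omega
            · have hbt : (String.ofList [c] == t) = false := beq_eq_false_iff_ne.mpr (Ne.symm hts)
              have htq : t ∈ q := by
                rcases List.mem_append.mp ht with h | h
                · exact h
                · simp at h; exact absurd h hts
              simp only [List.count_append, List.count_cons, List.count_nil, hbt]
              simpa using hok t htq
          rw [hstep, ih _ _ _ hq' hok']
          -- align the two conditionals
          have hcnt_eq : ∀ t, ((q ++ [String.ofList [c]]).count t : Int)
                + (((rest.map (·.2)).filter (fun c => !(c == '*'))).map (fun c => String.ofList [c])).count t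
              = (q.count t : Int)
                + (((((i, c) :: rest).map (·.2)).filter (fun c => !(c == '*'))).map (fun c => String.ofList [c])).count t := by
            intro t
            simp only [List.map_cons, List.filter_cons, hcb, Bool.not_false, if_true]
            simp [List.count_append, List.count_cons]
            split_ifs <;> push_cast <;> ring
          have hcond : ((∀ t ∈ ((rest.map (·.2)).filter (fun c => !(c == '*'))).map (fun c => String.ofList [c]), t ∈ fset)
                ∧ (∀ t ∈ ((rest.map (·.2)).filter (fun c => !(c == '*'))).map (fun c => String.ofList [c]),
                    ((q ++ [String.ofList [c]]).count t : Int) + ((((rest.map (·.2)).filter (fun c => !(c == '*'))).map (fun c => String.ofList [c])).count t : Int) ≤ fcnt.getD t 0))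
              ↔ ((∀ t ∈ ((((i, c) :: rest).map (·.2)).filter (fun c => !(c == '*'))).map (fun c => String.ofList [c]), t ∈ fset)
                ∧ (∀ t ∈ ((((i, c) :: rest).map (·.2)).filter (fun c => !(c == '*'))).map (fun c => String.ofList [c]),
                    (q.count t : Int) + ((((((i, c) :: rest).map (·.2)).filter (fun c => !(c == '*'))).map (fun c => String.ofList [c])).count t : Int) ≤ fcnt.getD t 0)) := by
            constructor
            · rintro ⟨h1, h2⟩
              constructor
              · intro t htm
                rcases (by simpa [hcb] using htm : t = String.ofList [c] ∨ t ∈ ((rest.map (·.2)).filter (fun c => !(c == '*'))).map (fun c => String.ofList [c])) with h | h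
                · subst h; exact hmem
                · exact h1 t h
              · intro t htm
                rcases (by simpa [hcb] using htm : t = String.ofList [c] ∨ t ∈ ((rest.map (·.2)).filter (fun c => !(c == '*'))).map (fun c => String.ofList [c])) with h | h
                · subst h
                  by_cases hin : String.ofList [c] ∈ ((rest.map (·.2)).filter (fun c => !(c == '*'))).map (fun c => String.ofList [c])
                  · rw [← hcnt_eq (String.ofList [c])]; exact h2 _ hin
                  · have hz : (((rest.map (·.2)).filter (fun c => !(c == '*'))).map (fun c => String.ofList [c])).count (String.ofList [c]) = 0 :=
                      List.count_eq_zero.mpr hin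
                    simp only [List.map_cons, List.filter_cons, hcb, Bool.not_false, if_true] at htm ⊢
                    simp [List.count_cons, hz]
                    omega
                · rw [← hcnt_eq t]; exact h2 t h
            · rintro ⟨h1, h2⟩
              refine ⟨fun t htm => h1 t (by simp [hcb]; right; simpa [hcb] using htm), fun t htm => ?_⟩
              rw [hcnt_eq t]
              exact h2 t (by simp [hcb]; right; simpa [hcb] using htm)
          by_cases hcnd : ((∀ t ∈ ((rest.map (·.2)).filter (fun c => !(c == '*'))).map (fun c => String.ofList [c]), t ∈ fset)
                ∧ (∀ t ∈ ((rest.map (·.2)).filter (fun c => !(c == '*'))).map (fun c => String.ofList [c]),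
                    ((q ++ [String.ofList [c]]).count t : Int) + ((((rest.map (·.2)).filter (fun c => !(c == '*'))).map (fun c => String.ofList [c])).count t : Int) ≤ fcnt.getD t 0))
          · rw [if_pos hcnd, if_pos (hcond.mp hcnd)]
            simp only [List.map_cons, List.filter_cons, hcb, Bool.not_false, if_true, List.countP_cons, List.length_cons, pvPM]
            simp [hcb]
            split_ifs <;> push_cast <;> omega
          · rw [if_neg hcnd, if_neg (fun hh => hcnd (hcond.mpr hh))]
      · have hstep : pvAltGo fgs fset fcnt ((i, c) :: rest) counts score = -1 := by
          simp [pvAltGo, hcb, hmem]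
        rw [hstep, if_neg]
        rintro ⟨h1, -⟩
        exact hmem (h1 (String.ofList [c]) (by simp [hcb]))

theorem pv_overflow_any (fcnt : PySem.Dict String Int) (l : List (String × Int)) :
    pvOverflowLoop fcnt l = l.any (fun p => decide (fcnt.getD p.1 0 < p.2)) := by
  induction l with
  | nil => rfl
  | cons p rest ih => cases p; simp [pvOverflowLoop, ih]

-- ===== VERDICT (by name: the statement is the Claim_ definition above) =====
theorem check_match_with_position_spec : Claim_equal_check_match_with_position := by
  intro window fgs fset fcnt _
  unfold Spec_check_match_with_position check_match_with_position check_match_with_position_alt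
  rw [pv_altGo_spec fgs fset (PySem.Dict.mk fcnt) (PySem.List.enumerate window.toList 0) PySem.Dict.empty 0 []
      (by intro s; simp) (by intro s hs; simp at hs)]
  rw [PySem.List.map_snd_enumerate]
  simp only [List.count_nil, Nat.cast_zero, zero_add]
  by_cases hkl : window.toList.filter (fun c => !(c == '*')) = []
  · -- all chars are '*': A returns 0, B's conditions hold vacuously
    have hE : ((PySem.Str.replace window "*" "").toList.isEmpty) = true := by
      rw [pv_replace_star, hkl]; rfl
    rw [if_pos hE]
    have hcp : (PySem.List.enumerate window.toList 0).countP (fun p => !(p.2 == '*') && pvPM fgs p) = 0 := by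
      apply List.countP_eq_zero.mpr
      intro p hp
      rcases (PySem.List.mem_enumerate_iff _ _ _).mp hp with ⟨k, hk, rfl⟩
      have : window.toList[k] ∈ window.toList := List.getElem_mem hk
      have hstar : (window.toList[k] == '*') = true := by
        have := List.filter_eq_nil_iff.mp hkl _ this
        simpa using this
      simp [hstar]
    rw [if_pos (by simp [hkl])]
    simp [hkl, hcp, pvPM] at *
    omega
  · have hE : ((PySem.Str.replace window "*" "").toList.isEmpty) = false := by
      rw [pv_replace_star]
      simpa [List.isEmpty_iff] using hkl
    rw [if_neg (by rw [hE]; simp)]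
    rw [pv_replace_star]
    set kl := window.toList.filter (fun c => !(c == '*')) with hkldef
    set L := kl.map (fun c => String.ofList [c]) with hLdef
    have hsub : PySem.Set.issubset (PySem.Set.ofList L) fset = true ↔ (∀ s ∈ L, s ∈ fset) := by
      rw [PySem.Set.issubset_iff]
      constructor
      · intro h s hs; exact h s ((PySem.Set.mem_ofList _ _).mpr hs)
      · intro h s hs; exact h s ((PySem.Set.mem_ofList _ _).mp hs)
    have hov : pvOverflowLoop (PySem.Dict.mk fcnt) (PySem.Dict.counter L).items = true
        ↔ ¬ (∀ s ∈ L, (L.count s : Int) ≤ (PySem.Dict.mk fcnt).getD s 0) := by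
      rw [pv_overflow_any, PySem.Dict.items_counter, List.any_map, List.any_eq_true]
      push_neg
      constructor
      · rintro ⟨k, hk, hlt⟩
        exact ⟨k, (PySem.Set.mem_ofList _ _).mp hk, by simpa using hlt⟩
      · rintro ⟨k, hk, hlt⟩
        exact ⟨k, (PySem.Set.mem_ofList _ _).mpr hk, by simpa using hlt⟩
    by_cases h1 : (∀ s ∈ L, s ∈ fset)
    · rw [if_neg (by simp [hsub.mpr h1])]
      by_cases h2 : (∀ s ∈ L, (L.count s : Int) ≤ (PySem.Dict.mk fcnt).getD s 0)
      · have hovf : pvOverflowLoop (PySem.Dict.mk fcnt) (PySem.Dict.counter L).items = false := by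
          rcases Bool.eq_false_or_eq_true (pvOverflowLoop (PySem.Dict.mk fcnt) (PySem.Dict.counter L).items) with h | h
          · exact absurd h2 (hov.mp h)
          · exact h
        rw [if_neg (by simp [hovf])]
        rw [if_pos ⟨h1, h2⟩]
        -- base score
        have hvals : (PySem.Dict.counter L).values = (PySem.Set.ofList L).map (fun k => (L.count k : Int)) := by
          rw [PySem.Dict.values_eq_map_keys _ (PySem.Dict.nodup_keys_counter L) 0, PySem.Dict.keys_counter]
          apply List.map_congr_left
          intro k _
          exact PySem.Dict.getD_counter L k
        rw [hvals, pv_sum_counts, pv_bonus_countP]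
        simp [hLdef, pvPM]
      · rw [if_pos (hov.mpr h2), if_neg (fun hh => h2 hh.2)]
    · have hc1f : PySem.Set.issubset (PySem.Set.ofList L) fset = false := by
        rcases Bool.eq_false_or_eq_true (PySem.Set.issubset (PySem.Set.ofList L) fset) with h | h
        · exact absurd (hsub.mp h) h1
        · exact h
      rw [if_pos (by simp [hc1f]), if_neg (fun hh => h1 hh.1)]
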